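-- pv_equiv track=rewrite | github.com/hopit-ai/india-trade-cli | engine/trader.py | _parse_synthesis_verdict
-- ===== SOURCE A (Python) =====
-- def _parse_synthesis_verdict(text: str) -> tuple[str, int, str]:
--     """Extract verdict, confidence, strategy from synthesis text."""
--     verdict = "HOLD"
--     confidence = 50
--     strategy = ""
--
--     for line in text.splitlines():
--         upper = line.strip().upper()
--         if upper.startswith("VERDICT:"):
--             val = line.split(":", 1)[1].strip().upper()
--             for v in ("STRONG_BUY", "STRONG_SELL", "BUY", "SELL", "HOLD"):
--                 if v in val:
--                     verdict = v
--                     break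
--         elif upper.startswith("CONFIDENCE:"):
--             try:
--                 confidence = int(line.split(":", 1)[1].strip().rstrip("%"))
--             except (ValueError, IndexError):
--                 pass
--         elif upper.startswith("STRATEGY"):
--             strategy = line.split(":", 1)[1].strip() if ":" in line else ""
--
--     return verdict, confidence, strategy
-- ===== SOURCE B (Python) =====
-- def _parse_synthesis_verdict(text: str) -> tuple[str, int, str]:
--     """Extract verdict, confidence, strategy from synthesis text
--     (three independent backward scans, last successfully-parsed line wins)."""
--     lines = text.splitlines()
--
--     def last(parse):
--         for line in reversed(lines):
--             res = parse(line)
--             if res is not None: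
--                 return res
--         return None
--
--     def parse_verdict(line):
--         if not line.strip().upper().startswith("VERDICT:"):
--             return None
--         val = line.split(":", 1)[1].strip().upper()
--         for v in ("STRONG_BUY", "STRONG_SELL", "BUY", "SELL", "HOLD"):
--             if v in val:
--                 return v
--         return None
--
--     def parse_confidence(line):
--         if not line.strip().upper().startswith("CONFIDENCE:"):
--             return None
--         try:
--             return int(line.split(":", 1)[1].strip().rstrip("%"))
--         except ValueError:
--             return None
--
--     def parse_strategy(line):
--         if not line.strip().upper().startswith("STRATEGY"):
--             return None
--         return line.split(":", 1)[1].strip() if ":" in line else ""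
--
--     v = last(parse_verdict)
--     c = last(parse_confidence)
--     s = last(parse_strategy)
--     return (v if v is not None else "HOLD",
--             c if c is not None else 50,
--             s if s is not None else "")
-- ===== Notes on version B (the rewrite author's own statement) =====
-- stated objective: alternative
-- what changed: Replaces A's single forward pass over the lines with last-wins mutable state by three independent backward scans, one per field, each returning the last successfully-parsed line's value (with HOLD/50/'' defaults).
import Mathlib
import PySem

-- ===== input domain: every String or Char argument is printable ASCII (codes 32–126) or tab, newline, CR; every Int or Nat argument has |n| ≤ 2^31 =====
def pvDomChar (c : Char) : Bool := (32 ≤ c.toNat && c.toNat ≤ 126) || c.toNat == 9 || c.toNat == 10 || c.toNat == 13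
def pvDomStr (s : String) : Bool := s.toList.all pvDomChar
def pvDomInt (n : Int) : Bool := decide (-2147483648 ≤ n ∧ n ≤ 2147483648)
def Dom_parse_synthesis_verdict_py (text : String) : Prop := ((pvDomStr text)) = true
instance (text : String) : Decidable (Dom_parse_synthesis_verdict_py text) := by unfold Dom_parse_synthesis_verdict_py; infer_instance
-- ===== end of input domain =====

-- B replaces A's single forward fold with mutable last-wins state by three independent
-- backward scans (last successfully-parsed line per field); objective: alternative decomposition.

-- ===== PORT A =====
-- line.split(":", 1)[1]; the [1] is guarded in A by the line containing ':' (the "VERDICT:"/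
-- "CONFIDENCE:" prefix or an explicit ':' test), so the getD "" default is never the result;
-- in the CONFIDENCE branch a missing [1] is an IndexError A catches with `pass`, and getD ""
-- makes int() fail the same way.
def pvPart (line : String) : String :=
  match PySem.Str.splitMax? line ":" 1 with
  | some parts => (PySem.List.pyGet? parts 1).getD ""
  | none => ""

-- int(x.strip().rstrip("%")); rstrip("%") ported by hand (drop trailing '%'), exact
def pvConfVal (line : String) : Option Int :=
  PySem.Int.ofChars? (((PySem.Str.strip (pvPart line)).toList.reverse.dropWhile (fun c => c == '%')).reverse)

def pvStepA (st : String × Int × String) (line : String) : String × Int × String :=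
  let up := PySem.Str.upper (PySem.Str.strip line)
  if PySem.Str.startswith up "VERDICT:" then
    let val := PySem.Str.upper (PySem.Str.strip (pvPart line))
    match ["STRONG_BUY", "STRONG_SELL", "BUY", "SELL", "HOLD"].find? (fun v => PySem.Str.isIn v val) with
    | some v => (v, st.2.1, st.2.2)
    | none => st
  else if PySem.Str.startswith up "CONFIDENCE:" then
    match pvConfVal line with
    | some c => (st.1, c, st.2.2)
    | none => st
  else if PySem.Str.startswith up "STRATEGY" then
    (st.1, st.2.1, if PySem.Str.isIn ":" line then PySem.Str.strip (pvPart line) else "")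
  else st

def parse_synthesis_verdict_py (text : String) : String × Int × String :=
  (PySem.Str.splitlines text).foldl pvStepA ("HOLD", 50, "")

-- ===== PORT B =====
def pvParseVerdict (line : String) : Option String :=
  if PySem.Str.startswith (PySem.Str.upper (PySem.Str.strip line)) "VERDICT:" then
    ["STRONG_BUY", "STRONG_SELL", "BUY", "SELL", "HOLD"].find?
      (fun v => PySem.Str.isIn v (PySem.Str.upper (PySem.Str.strip (pvPart line))))
  else none

def pvParseConfidence (line : String) : Option Int :=
  if PySem.Str.startswith (PySem.Str.upper (PySem.Str.strip line)) "CONFIDENCE:" then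
    pvConfVal line
  else none

def pvParseStrategy (line : String) : Option String :=
  if PySem.Str.startswith (PySem.Str.upper (PySem.Str.strip line)) "STRATEGY" then
    some (if PySem.Str.isIn ":" line then PySem.Str.strip (pvPart line) else "")
  else none

-- `for line in reversed(lines): if (r := parse(line)) is not None: return r`
def pvLast {α : Type} (f : String → Option α) : List String → Option α
  | [] => none
  | l :: rest =>
    match f l with
    | some r => some r
    | none => pvLast f rest

def parse_synthesis_verdict_py_alt (text : String) : String × Int × String :=
  let lines := PySem.Str.splitlines text
  ((pvLast pvParseVerdict lines.reverse).getD "HOLD",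
   (pvLast pvParseConfidence lines.reverse).getD 50,
   (pvLast pvParseStrategy lines.reverse).getD "")

-- ===== PRECONDITION & SPEC =====
def Spec_parse_synthesis_verdict_py (text : String) (out : String × Int × String) : Prop := out = parse_synthesis_verdict_py_alt text
instance (text : String) (out : String × Int × String) : Decidable (Spec_parse_synthesis_verdict_py text out) := by unfold Spec_parse_synthesis_verdict_py; infer_instance

-- ===== CLAIM (what is proved, stated in full; the proofs are below) =====
def Claim_equal_parse_synthesis_verdict_py : Prop := ∀ (text : String), Dom_parse_synthesis_verdict_py text → Spec_parse_synthesis_verdict_py text (parse_synthesis_verdict_py text)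

-- ===== LEMMAS AND PROOFS =====

-- the three prefixes "VERDICT:", "CONFIDENCE:", "STRATEGY" are pairwise incompatible
lemma pv_head_of_prefix {u p : List Char} (h : p <+: u) (hne : p ≠ []) : u.head? = p.head? := by
  obtain ⟨t, rfl⟩ := h
  cases p with
  | nil => exact absurd rfl hne
  | cons a as => rfl

lemma pv_excl {u p q : String} (hp : PySem.Str.startswith u p = true)
    (hpn : p.toList ≠ []) (hqn : q.toList ≠ [])
    (hne : p.toList.head? ≠ q.toList.head?) :
    PySem.Str.startswith u q = false := by
  by_contra h
  rw [Bool.not_eq_false] at h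
  rw [PySem.Str.startswith_eq, PySem.Chars.startswith_iff] at hp h
  exact hne ((pv_head_of_prefix hp hpn).symm.trans (pv_head_of_prefix h hqn))

lemma pvStepA_fst (st : String × Int × String) (l : String) :
    (pvStepA st l).1 = (pvParseVerdict l).getD st.1 := by
  unfold pvStepA pvParseVerdict
  by_cases hV : PySem.Str.startswith (PySem.Str.upper (PySem.Str.strip l)) "VERDICT:" = true
  · simp only [hV, if_true]
    cases h : List.find? (fun v => PySem.Str.isIn v (PySem.Str.upper (PySem.Str.strip (pvPart l)))) ["STRONG_BUY", "STRONG_SELL", "BUY", "SELL", "HOLD"] <;> rfl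
  · simp only [Bool.not_eq_true] at hV
    simp only [hV, Bool.false_eq_true, if_false]
    by_cases hC : PySem.Str.startswith (PySem.Str.upper (PySem.Str.strip l)) "CONFIDENCE:" = true
    · simp only [hC, if_true]
      cases h : pvConfVal l <;> rfl
    · simp only [Bool.not_eq_true] at hC
      simp only [hC, Bool.false_eq_true, if_false]
      by_cases hS : PySem.Str.startswith (PySem.Str.upper (PySem.Str.strip l)) "STRATEGY" = true
      · simp only [hS, if_true]
        rfl
      · simp only [Bool.not_eq_true] at hS
        simp only [hS, Bool.false_eq_true, if_false]
        rfl

lemma pvStepA_c (st : String × Int × String) (l : String) :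
    (pvStepA st l).2.1 = (pvParseConfidence l).getD st.2.1 := by
  unfold pvStepA pvParseConfidence
  by_cases hV : PySem.Str.startswith (PySem.Str.upper (PySem.Str.strip l)) "VERDICT:" = true
  · have hC : PySem.Str.startswith (PySem.Str.upper (PySem.Str.strip l)) "CONFIDENCE:" = false :=
      pv_excl hV (by decide) (by decide) (by decide)
    simp only [hV, if_true, hC, Bool.false_eq_true, if_false]
    cases h : List.find? (fun v => PySem.Str.isIn v (PySem.Str.upper (PySem.Str.strip (pvPart l)))) ["STRONG_BUY", "STRONG_SELL", "BUY", "SELL", "HOLD"] <;> rfl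
  · simp only [Bool.not_eq_true] at hV
    simp only [hV, Bool.false_eq_true, if_false]
    by_cases hC : PySem.Str.startswith (PySem.Str.upper (PySem.Str.strip l)) "CONFIDENCE:" = true
    · simp only [hC, if_true]
      cases h : pvConfVal l <;> rfl
    · simp only [Bool.not_eq_true] at hC
      simp only [hC, Bool.false_eq_true, if_false]
      by_cases hS : PySem.Str.startswith (PySem.Str.upper (PySem.Str.strip l)) "STRATEGY" = true
      · simp only [hS, if_true]
        rfl
      · simp only [Bool.not_eq_true] at hS
        simp only [hS, Bool.false_eq_true, if_false]
        rfl

lemma pvStepA_s (st : String × Int × String) (l : String) :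
    (pvStepA st l).2.2 = (pvParseStrategy l).getD st.2.2 := by
  unfold pvStepA pvParseStrategy
  by_cases hV : PySem.Str.startswith (PySem.Str.upper (PySem.Str.strip l)) "VERDICT:" = true
  · have hS : PySem.Str.startswith (PySem.Str.upper (PySem.Str.strip l)) "STRATEGY" = false :=
      pv_excl hV (by decide) (by decide) (by decide)
    simp only [hV, if_true, hS, Bool.false_eq_true, if_false]
    cases h : List.find? (fun v => PySem.Str.isIn v (PySem.Str.upper (PySem.Str.strip (pvPart l)))) ["STRONG_BUY", "STRONG_SELL", "BUY", "SELL", "HOLD"] <;> rfl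
  · simp only [Bool.not_eq_true] at hV
    simp only [hV, Bool.false_eq_true, if_false]
    by_cases hC : PySem.Str.startswith (PySem.Str.upper (PySem.Str.strip l)) "CONFIDENCE:" = true
    · have hS : PySem.Str.startswith (PySem.Str.upper (PySem.Str.strip l)) "STRATEGY" = false :=
        pv_excl hC (by decide) (by decide) (by decide)
      simp only [hC, if_true, hS, Bool.false_eq_true, if_false]
      cases h : pvConfVal l <;> rfl
    · simp only [Bool.not_eq_true] at hC
      simp only [hC, Bool.false_eq_true, if_false]
      by_cases hS : PySem.Str.startswith (PySem.Str.upper (PySem.Str.strip l)) "STRATEGY" = true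
      · simp only [hS, if_true]
        rfl
      · simp only [Bool.not_eq_true] at hS
        simp only [hS, Bool.false_eq_true, if_false]
        rfl

lemma pvLast_append {α : Type} (f : String → Option α) (xs : List String) (l : String) :
    pvLast f (xs ++ [l]) =
      match pvLast f xs with
      | some r => some r
      | none => f l := by
  induction xs with
  | nil =>
    simp only [List.nil_append, pvLast]
    cases f l <;> rfl
  | cons x xs ih =>
    simp only [List.cons_append, pvLast]
    cases f x <;> simp [ih]

lemma pv_main (lines : List String) (st : String × Int × String) :
    lines.foldl pvStepA st =
      ((pvLast pvParseVerdict lines.reverse).getD st.1,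
       (pvLast pvParseConfidence lines.reverse).getD st.2.1,
       (pvLast pvParseStrategy lines.reverse).getD st.2.2) := by
  induction lines generalizing st with
  | nil => simp [pvLast]
  | cons l rest ih =>
    simp only [List.foldl_cons, List.reverse_cons]
    rw [ih]
    rw [pvLast_append, pvLast_append, pvLast_append]
    rw [pvStepA_fst, pvStepA_c, pvStepA_s]
    cases pvLast pvParseVerdict rest.reverse <;>
    cases pvLast pvParseConfidence rest.reverse <;>
    cases pvLast pvParseStrategy rest.reverse <;> simp

-- ===== VERDICT (by name: the statement is the Claim_ definition above) =====
theorem parse_synthesis_verdict_py_spec : Claim_equal_parse_synthesis_verdict_py := by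
  intro text _
  unfold Spec_parse_synthesis_verdict_py parse_synthesis_verdict_py parse_synthesis_verdict_py_alt
  exact pv_main _ _
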